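-- pv_equiv track=rewrite | github.com/ganeshgowri-ASA/test-protocols | protocols/validators/protocol_validator.py | validate_fire_test_safety
-- ===== SOURCE A (Python) =====
-- from typing import Dict, List, Tuple, Any, Optional
--
-- def validate_fire_test_safety(protocol_def: Dict) -> Tuple[bool, List[str]]:
--     """Validate fire test safety requirements"""
--     messages = []
--     is_valid = True
--
--     interlocks = protocol_def.get("safetyInterlocks", [])
--
--     # Required fire test safety items
--     required_items = [
--         "fire suppression",
--         "ventilation",
--         "personnel trained",
--         "ppe"
--     ]
--
--     for required in required_items:
--         found = any(
--             required.lower() in i.get("condition", "").lower() or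
--             required.lower() in i.get("message", "").lower()
--             for i in interlocks
--         )
--
--         if not found:
--             messages.append(f"WARNING: Consider adding fire test safety check: {required}")
--
--     return is_valid, messages
-- ===== SOURCE B (Python) =====
-- def validate_fire_test_safety(protocol_def):
--     """Validate fire test safety requirements"""
--     interlocks = protocol_def.get("safetyInterlocks", [])
--
--     # Build the searchable text once: every condition/message, lowercased,
--     # joined with '\n' (which occurs in no required phrase).
--     parts = []
--     for i in interlocks:
--         parts.append(i.get("condition", "").lower())
--         parts.append(i.get("message", "").lower())
--     combined = "\n".join(parts)
--
--     messages = [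
--         f"WARNING: Consider adding fire test safety check: {required}"
--         for required in ("fire suppression", "ventilation", "personnel trained", "ppe")
--         if required not in combined
--     ]
--     return True, messages
-- ===== Notes on version B (the rewrite author's own statement) =====
-- stated objective: alternative
-- what changed: Instead of re-scanning all interlocks once per required phrase with any(), B makes a single pass collecting every lowercased condition/message, joins them with '\n' (a separator no required phrase contains) into one combined string, and answers each of the 4 required phrases by one substring test on that string.
import Mathlib
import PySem

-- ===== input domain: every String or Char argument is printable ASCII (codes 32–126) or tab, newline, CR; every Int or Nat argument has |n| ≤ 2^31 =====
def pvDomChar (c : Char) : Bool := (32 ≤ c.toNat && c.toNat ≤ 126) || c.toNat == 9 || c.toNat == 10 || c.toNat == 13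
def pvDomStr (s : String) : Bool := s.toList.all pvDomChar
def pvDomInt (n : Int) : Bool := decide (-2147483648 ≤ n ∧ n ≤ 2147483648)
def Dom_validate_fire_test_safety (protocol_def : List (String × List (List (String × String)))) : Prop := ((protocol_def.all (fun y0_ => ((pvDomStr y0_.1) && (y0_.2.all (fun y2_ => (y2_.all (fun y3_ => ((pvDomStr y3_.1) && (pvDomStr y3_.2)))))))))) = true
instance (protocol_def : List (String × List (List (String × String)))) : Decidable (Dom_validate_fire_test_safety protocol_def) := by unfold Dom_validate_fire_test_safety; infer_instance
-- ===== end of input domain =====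

-- B replaces A's per-phrase rescan of all interlocks by one pass that joins all lowercased
-- condition/message texts with '\n' and answers each required phrase with a single substring test
-- (objective: alternative decomposition, same result).


-- ===== PORT A =====
def validate_fire_test_safety (protocol_def : List (String × List (List (String × String)))) : Bool × List String :=
  let messages : List String := []
  let is_valid := true
  let interlocks := PySem.Dict.getD (PySem.Dict.mk protocol_def) "safetyInterlocks" []
  let required_items := ["fire suppression", "ventilation", "personnel trained", "ppe"]
  let messages := required_items.foldl (fun messages required =>
    let found := interlocks.any (fun i =>
      PySem.Str.isIn (PySem.Str.lower required)
        (PySem.Str.lower (PySem.Dict.getD (PySem.Dict.mk i) "condition" "")) ||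
      PySem.Str.isIn (PySem.Str.lower required)
        (PySem.Str.lower (PySem.Dict.getD (PySem.Dict.mk i) "message" "")))
    if !found then
      messages ++ ["WARNING: Consider adding fire test safety check: " ++ required]
    else messages) messages
  (is_valid, messages)

-- ===== PORT B =====
def validate_fire_test_safety_alt (protocol_def : List (String × List (List (String × String)))) : Bool × List String :=
  let interlocks := PySem.Dict.getD (PySem.Dict.mk protocol_def) "safetyInterlocks" []
  let parts := interlocks.foldl (fun parts i =>
    (parts ++ [PySem.Str.lower (PySem.Dict.getD (PySem.Dict.mk i) "condition" "")])
          ++ [PySem.Str.lower (PySem.Dict.getD (PySem.Dict.mk i) "message" "")]) []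
  let combined := PySem.Str.join "\n" parts
  let messages := (["fire suppression", "ventilation", "personnel trained", "ppe"].filter
      (fun required => !PySem.Str.isIn required combined)).map
      (fun required => "WARNING: Consider adding fire test safety check: " ++ required)
  (true, messages)

-- ===== PRECONDITION & SPEC =====
def Spec_validate_fire_test_safety (protocol_def : List (String × List (List (String × String)))) (out : Bool × List String) : Prop := out = validate_fire_test_safety_alt protocol_def
instance (protocol_def : List (String × List (List (String × String)))) (out : Bool × List String) : Decidable (Spec_validate_fire_test_safety protocol_def out) := by unfold Spec_validate_fire_test_safety; infer_instance

-- ===== CLAIM (what is proved, stated in full; the proofs are below) =====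
def Claim_equal_validate_fire_test_safety : Prop := ∀ (protocol_def : List (String × List (List (String × String)))), Dom_validate_fire_test_safety protocol_def → Spec_validate_fire_test_safety protocol_def (validate_fire_test_safety protocol_def)

-- ===== LEMMAS AND PROOFS =====

-- A's conditional-append loop over the required items is filter-then-map.
theorem foldl_if_append_eq_filter_map {α β : Type} (p : α → Bool) (f : α → β)
    (rs : List α) (acc : List β) :
    rs.foldl (fun m r => if !(p r) then m ++ [f r] else m) acc
      = acc ++ (rs.filter (fun r => !(p r))).map f := by
  induction rs generalizing acc with
  | nil => simp
  | cons r rs ih =>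
    rw [List.foldl_cons, ih, List.filter_cons]
    cases h : p r
    · simp
    · simp [h]

-- B's two appends per interlock produce the flattened condition/message texts.
theorem foldl_two_append_eq_flatMap {α β : Type} (c m : α → β) (l : List α) (acc : List β) :
    l.foldl (fun acc i => (acc ++ [c i]) ++ [m i]) acc
      = acc ++ l.flatMap (fun i => [c i, m i]) := by
  induction l generalizing acc with
  | nil => simp
  | cons i l ih => rw [List.foldl_cons, ih]; simp

-- A prefix of `L ++ x :: b` that avoids x is a prefix of L.
theorem prefix_avoiding_elem {α : Type} (x : α) (sub L b : List α) (hx : x ∉ sub)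
    (hp : sub <+: L ++ x :: b) : sub <+: L := by
  by_cases hlen : sub.length ≤ L.length
  · have heq := List.prefix_iff_eq_take.mp hp
    rw [List.take_append_of_le_length hlen] at heq
    exact heq ▸ List.take_prefix _ _
  · exfalso
    have heq := List.prefix_iff_eq_take.mp hp
    rw [List.take_append, List.take_of_length_le (i := sub.length) (l := L) (by omega)] at heq
    obtain ⟨k, hk⟩ : ∃ k, sub.length - L.length = k + 1 := ⟨sub.length - L.length - 1, by omega⟩
    rw [hk] at heq
    exact hx (heq ▸ (by simp : x ∈ L ++ List.take (k + 1) (x :: b)))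

-- A substring avoiding x that occurs in `a ++ x :: b` lies entirely inside a or inside b.
theorem infix_append_cons_iff {α : Type} (x : α) (sub a b : List α) (hx : x ∉ sub) :
    sub <:+: a ++ x :: b ↔ sub <:+: a ∨ sub <:+: b := by
  induction a with
  | nil =>
    simp only [List.nil_append]
    constructor
    · intro h
      rcases List.infix_cons_iff.mp h with hp | hi
      · cases sub with
        | nil => exact Or.inl List.nil_infix
        | cons s ss =>
          rcases hp with ⟨t, ht⟩
          simp only [List.cons_append, List.cons.injEq] at ht
          exact absurd (ht.1 ▸ List.mem_cons_self) hx
      · exact Or.inr hi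
    · rintro (h | h)
      · rw [List.infix_nil] at h; simp [h]
      · exact h.trans (List.infix_cons List.infix_rfl)
  | cons y a' ih =>
    constructor
    · intro h
      rcases List.infix_cons_iff.mp h with hp | hi
      · -- a prefix avoiding x cannot reach past x
        exact Or.inl (prefix_avoiding_elem x sub (y :: a') b hx hp).isInfix
      · rcases ih.mp hi with h1 | h2
        · exact Or.inl (h1.trans (List.infix_cons List.infix_rfl))
        · exact Or.inr h2
    · rintro (h | h)
      · rcases h with ⟨s, t, hst⟩
        exact ⟨s, t ++ x :: b, by rw [← hst]; simp⟩
      · rcases h with ⟨s, t, hst⟩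
        exact ⟨(y :: a') ++ x :: s, t, by rw [← hst]; simp⟩

-- Bool form of the previous lemma, on PySem's substring test.
theorem isIn_append_cons (x : Char) (sub a b : List Char) (hx : x ∉ sub) :
    PySem.Chars.isIn sub (a ++ x :: b)
      = (PySem.Chars.isIn sub a || PySem.Chars.isIn sub b) := by
  cases ha : PySem.Chars.isIn sub a with
  | true =>
    rw [Bool.true_or, PySem.Chars.isIn_iff_infix]
    exact (infix_append_cons_iff x sub a b hx).mpr
      (Or.inl ((PySem.Chars.isIn_iff_infix _ _).mp ha))
  | false =>
    cases hb : PySem.Chars.isIn sub b with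
    | true =>
      rw [Bool.false_or, PySem.Chars.isIn_iff_infix]
      exact (infix_append_cons_iff x sub a b hx).mpr
        (Or.inr ((PySem.Chars.isIn_iff_infix _ _).mp hb))
    | false =>
      rw [Bool.false_or, PySem.Chars.isIn_eq_false_iff,
          infix_append_cons_iff x sub a b hx]
      rintro (h | h)
      · exact (PySem.Chars.isIn_eq_false_iff _ _).mp ha h
      · exact (PySem.Chars.isIn_eq_false_iff _ _).mp hb h

-- Substring search in the '\n'-joined text equals searching each part.
theorem isIn_join_sep (sep : Char) (sub : List Char) (h1 : sub ≠ []) (h2 : sep ∉ sub)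
    (ps : List (List Char)) :
    PySem.Chars.isIn sub (PySem.Chars.join [sep] ps)
      = ps.any (fun p => PySem.Chars.isIn sub p) := by
  induction ps with
  | nil =>
    rw [PySem.Chars.join_nil, List.any_nil, PySem.Chars.isIn_eq_false_iff, List.infix_nil]
    exact h1
  | cons p ps ih =>
    cases ps with
    | nil => simp [PySem.Chars.join_singleton]
    | cons q rest =>
      rw [PySem.Chars.join_cons_cons,
          show p ++ [sep] ++ PySem.Chars.join [sep] (q :: rest)
             = p ++ sep :: PySem.Chars.join [sep] (q :: rest) from by simp,
          isIn_append_cons sep sub p _ h2, ih]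
      simp

-- The core fact: A's any-scan for phrase r equals one substring test on B's combined text.
theorem any_scan_eq_isIn_combined (r : String) (h1 : r.toList ≠ []) (h2 : '\n' ∉ r.toList)
    (il : List (List (String × String))) :
    (il.any (fun i =>
      PySem.Str.isIn r (PySem.Str.lower (PySem.Dict.getD (PySem.Dict.mk i) "condition" "")) ||
      PySem.Str.isIn r (PySem.Str.lower (PySem.Dict.getD (PySem.Dict.mk i) "message" ""))))
    = PySem.Str.isIn r (PySem.Str.join "\n" (il.foldl (fun parts i =>
        (parts ++ [PySem.Str.lower (PySem.Dict.getD (PySem.Dict.mk i) "condition" "")])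
              ++ [PySem.Str.lower (PySem.Dict.getD (PySem.Dict.mk i) "message" "")]) [])) := by
  rw [foldl_two_append_eq_flatMap]
  simp only [List.nil_append, PySem.Str.isIn_eq, PySem.Str.toList_join]
  rw [show ("\n" : String).toList = ['\n'] from rfl, isIn_join_sep '\n' r.toList h1 h2]
  simp only [List.map_flatMap, List.any_flatMap, List.map_cons, List.map_nil,
    List.any_cons, List.any_nil, Bool.or_false]

-- ===== VERDICT (by name: the statement is the Claim_ definition above) =====
theorem validate_fire_test_safety_spec : Claim_equal_validate_fire_test_safety := by
  intro protocol_def _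
  unfold Spec_validate_fire_test_safety validate_fire_test_safety validate_fire_test_safety_alt
  simp only
  rw [foldl_if_append_eq_filter_map]
  simp only [List.nil_append, Prod.mk.injEq, true_and]
  apply congrArg
  apply List.filter_congr
  intro r hr
  apply congrArg
  fin_cases hr
  · rw [show PySem.Str.lower "fire suppression" = "fire suppression" from by decide]
    exact any_scan_eq_isIn_combined _ (by decide) (by decide) _
  · rw [show PySem.Str.lower "ventilation" = "ventilation" from by decide]
    exact any_scan_eq_isIn_combined _ (by decide) (by decide) _
  · rw [show PySem.Str.lower "personnel trained" = "personnel trained" from by decide]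
    exact any_scan_eq_isIn_combined _ (by decide) (by decide) _
  · rw [show PySem.Str.lower "ppe" = "ppe" from by decide]
    exact any_scan_eq_isIn_combined _ (by decide) (by decide) _
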